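-- pv_equiv track=rewrite | github.com/mariusconjeaud/openstudybuilder-solution-lite | mdr-standards-import/mdr_standards_import/cdisc_ct/utils.py | are_lists_equal
-- ===== SOURCE A (Python) =====
-- def are_lists_equal(list1, list2):
--     """
--     Compares two lists of string items as if they were sets.
--     - Duplicates are removed in each of the lists.
--     - The order of the entries does not matter.
--     - The comparison is done case-insensitive.
--     - None entries are ignored.
--
--     :param list1: The first list of items (e.g. synonyms or concept ids) to compare with the second one.
--     :param list2: The second list of items to compare with the first one.
--     :return: True if the two lists are identical as described above. False otherwise.
--     """
--
--     if list1 is None and list2 is None: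
--         return True
--
--     if list1 is None or list2 is None:
--         return False
--
--     set1 = set([item.lower() for item in list1 if item is not None])
--     set2 = set([item.lower() for item in list2 if item is not None])
--
--     return are_sets_equal(set1, set2)
--
-- def are_sets_equal(set1, set2):
--     if set1 is None and set2 is None:
--         return True
--
--     if set1 is None or set2 is None:
--         return False
--
--     if len(set1) != len(set2):
--         return False
--
--     diff = set1.symmetric_difference(set2)
--     return len(diff) == 0
-- ===== SOURCE B (Python) =====
-- def are_lists_equal(list1, list2):
--     if list1 is None and list2 is None:
--         return True
--     if list1 is None or list2 is None:
--         return False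
--     return sorted({item.lower() for item in list1 if item is not None}) == \
--            sorted({item.lower() for item in list2 if item is not None})
-- ===== Notes on version B (the rewrite author's own statement) =====
-- stated objective: idiomatic
-- what changed: Replaces the hash-set length-and-symmetric-difference comparison (and drops the are_sets_equal helper) with building a sorted deduplicated list of lowered items per side and comparing the two sorted lists positionally.
import Mathlib
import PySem

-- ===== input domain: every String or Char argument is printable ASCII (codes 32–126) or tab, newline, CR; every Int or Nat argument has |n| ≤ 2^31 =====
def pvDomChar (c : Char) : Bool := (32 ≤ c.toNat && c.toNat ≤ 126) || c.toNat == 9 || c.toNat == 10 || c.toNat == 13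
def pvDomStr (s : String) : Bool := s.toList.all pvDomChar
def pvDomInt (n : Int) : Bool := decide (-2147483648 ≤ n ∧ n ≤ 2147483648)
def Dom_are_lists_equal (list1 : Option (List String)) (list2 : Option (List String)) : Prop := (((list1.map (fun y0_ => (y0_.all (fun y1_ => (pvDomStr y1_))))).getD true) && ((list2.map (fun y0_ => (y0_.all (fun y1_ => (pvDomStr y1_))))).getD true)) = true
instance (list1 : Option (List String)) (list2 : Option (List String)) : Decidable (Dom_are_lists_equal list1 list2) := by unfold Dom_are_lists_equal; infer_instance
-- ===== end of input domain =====

-- ===== PORT A =====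
-- B re-implements the comparison as sort-and-compare; A uses hash-set length + symmetric difference.
-- helper: Python are_sets_equal (its 'is None' guards never fire here: A always passes real sets)
def are_sets_equal (s1 : PySem.Set String) (s2 : PySem.Set String) : Bool :=
  if PySem.Set.len s1 ≠ PySem.Set.len s2 then false
  else PySem.Set.len (PySem.Set.symmDiff s1 s2) == 0

def are_lists_equal (list1 : Option (List String)) (list2 : Option (List String)) : Bool :=
  match list1, list2 with
  | none, none => true
  | none, some _ => false
  | some _, none => false
  | some l1, some l2 =>
    let set1 : PySem.Set String := PySem.Set.ofList (l1.map (fun item => PySem.Str.lower item))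
    let set2 : PySem.Set String := PySem.Set.ofList (l2.map (fun item => PySem.Str.lower item))
    are_sets_equal set1 set2

-- ===== PORT B =====
def are_lists_equal_alt (list1 : Option (List String)) (list2 : Option (List String)) : Bool :=
  match list1, list2 with
  | none, none => true
  | none, some _ => false
  | some _, none => false
  | some l1, some l2 =>
    PySem.List.sorted (PySem.Set.ofList (l1.map (fun item => PySem.Str.lower item))) (fun x => x) false
      == PySem.List.sorted (PySem.Set.ofList (l2.map (fun item => PySem.Str.lower item))) (fun x => x) false

-- ===== PRECONDITION & SPEC =====
def Spec_are_lists_equal (list1 : Option (List String)) (list2 : Option (List String)) (out : Bool) : Prop := out = are_lists_equal_alt list1 list2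
instance (list1 : Option (List String)) (list2 : Option (List String)) (out : Bool) : Decidable (Spec_are_lists_equal list1 list2 out) := by unfold Spec_are_lists_equal; infer_instance

-- ===== CLAIM (what is proved, stated in full; the proofs are below) =====
def Claim_equal_are_lists_equal : Prop := ∀ (list1 : Option (List String)) (list2 : Option (List String)), Dom_are_lists_equal list1 list2 → Spec_are_lists_equal list1 list2 (are_lists_equal list1 list2)

-- ===== LEMMAS AND PROOFS =====

-- both comparisons decide the same thing: whether the two deduplicated sets have the same members
lemma sets_equal_iff_sorted_eq (xs ys : List String) :
    are_sets_equal (PySem.Set.ofList xs) (PySem.Set.ofList ys)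
      = (PySem.List.sorted (PySem.Set.ofList xs) (fun x => x) false
          == PySem.List.sorted (PySem.Set.ofList ys) (fun x => x) false) := by
  set s := PySem.Set.ofList xs with hs
  set t := PySem.Set.ofList ys with ht
  by_cases h : ∀ x, x ∈ s ↔ x ∈ t
  · have hperm : s.Perm t :=
      (List.perm_ext_iff_of_nodup (PySem.Set.nodup_ofList xs) (PySem.Set.nodup_ofList ys)).2 h
    have hsortt : PySem.List.sorted t (fun x => x) = PySem.List.sorted s (fun x => x) := by
      apply PySem.List.sorted_eq_of_perm_of_pairwise_lt
      · exact (PySem.List.sorted_perm s _ false).trans hperm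
      · exact PySem.List.sorted_ofList_pairwise_lt xs
    have hsym : PySem.Set.symmDiff s t = [] := by
      rw [List.eq_nil_iff_forall_not_mem]
      intro x hx
      rcases (PySem.Set.mem_symmDiff s t x).1 hx with ⟨h1, h2⟩ | ⟨h1, h2⟩
      · exact h2 ((h x).1 h1)
      · exact h2 ((h x).2 h1)
    simp [are_sets_equal, PySem.Set.len, hsym, hperm.length_eq, hsortt]
  · have h1 : (PySem.List.sorted s (fun x => x) == PySem.List.sorted t (fun x => x)) = false := by
      refine beq_eq_false_iff_ne.2 fun heq => h fun x => ?_
      rw [← PySem.List.mem_sorted s (fun x => x) false x, heq, PySem.List.mem_sorted]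
    rw [h1]
    unfold are_sets_equal
    split_ifs with hl
    · rfl
    · push Not at h
      obtain ⟨x, hx⟩ := h
      have hmem : x ∈ PySem.Set.symmDiff s t := (PySem.Set.mem_symmDiff s t x).2 (hx.imp id And.symm)
      have hne : PySem.Set.symmDiff s t ≠ [] := fun hnil => by simp [hnil] at hmem
      simp [PySem.Set.len, List.length_eq_zero_iff, hne]

-- ===== VERDICT (by name: the statement is the Claim_ definition above) =====
theorem are_lists_equal_spec : Claim_equal_are_lists_equal := by
  intro list1 list2 _
  unfold Spec_are_lists_equal
  match list1, list2 with
  | none, none => rfl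
  | none, some _ => rfl
  | some _, none => rfl
  | some l1, some l2 =>
    simp only [are_lists_equal, are_lists_equal_alt]
    exact sets_equal_iff_sorted_eq _ _
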